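-- pv_equiv track=rewrite | github.com/ivysun14/CS161-Artificial-Intelligence | HW2/hw2.py | MULT_DFS
-- ===== SOURCE A (Python) =====
-- def FINAL_STATE(S):
--     homer, baby, dog, poison = S  # take each element of the tuple
--     if homer and baby and dog and poison:
--         return True
--     return False
--
-- def NEXT_STATE(S, A):
--     homer, baby, dog, poison = S  # current state
--     homer_new = not homer  # homer will always move
--
--     if A == "h" and (baby != poison) and (baby != dog):  # only homer move
--         return [(homer_new, baby, dog, poison)]
--
--     if A == "b" and (homer == baby):  # homer and baby are on the same side
--         baby_new = not baby
--         return [(homer_new, baby_new, dog, poison)]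
--
--     if A == "d" and (homer == dog):  # homer and dog are on the same side
--         dog_new = not dog
--         if (baby != poison):
--             return [(homer_new, baby, dog_new, poison)]
--
--     if A == "p" and (homer == poison):  # homer and poison are on the same side
--         poison_new = not poison
--         if (baby != dog):
--             return [(homer_new, baby, dog, poison_new)]
--
--     return []
--
-- def SUCC_FN(S):
--     operator = ["h", "b", "d", "p"]
--     legal_successors = []
--
--     for operation in operator:
--         legal_successors += NEXT_STATE(S, operation)
--
--     return legal_successors
--
-- def ON_PATH(S, STATES):
--     if len(STATES) == 0:
--         return False
--     if S in STATES:
--         return True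
--     return False
--
-- def MULT_DFS(STATES, PATH):
--
--     if len(STATES) == 0:  # if no more legal successors, return empty path since reached dead end
--         return []
--
--     for successor in STATES:
--         if FINAL_STATE(successor):
--             return PATH + [successor]
--         if not ON_PATH(successor, PATH):
--             further_successor = SUCC_FN(successor)
--             temp_path = MULT_DFS(further_successor, PATH + [successor])
--             if temp_path == []:
--                 pass
--             else:
--                 if FINAL_STATE(temp_path[-1]):
--                     return temp_path
--
--     return []
--
--     """# DFS with iteration (including dead end)
--     while len(STATES) > 0:  # still states unexplored
--         # take last element in the stack of legal successors
--         successor = STATES.pop()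
--
--         if FINAL_STATE(successor):  # check if reached goal state
--             PATH.append(successor)
--             return PATH
--         # check if already explored, if not generate successors and add to stack, add current node to PATH
--         if not ON_PATH(successor, PATH):
--             STATES += SUCC_FN(successor)
--             PATH.append(successor)
--
--     return []"""
-- ===== SOURCE B (Python) =====
-- def FINAL_STATE(S):
--     homer, baby, dog, poison = S
--     return bool(homer and baby and dog and poison)
--
-- def NEXT_STATE(S, A):
--     homer, baby, dog, poison = S
--     homer_new = not homer
--     if A == "h" and (baby != poison) and (baby != dog):
--         return [(homer_new, baby, dog, poison)]
--     if A == "b" and (homer == baby):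
--         return [(homer_new, not baby, dog, poison)]
--     if A == "d" and (homer == dog):
--         if baby != poison:
--             return [(homer_new, baby, not dog, poison)]
--     if A == "p" and (homer == poison):
--         if baby != dog:
--             return [(homer_new, baby, dog, not poison)]
--     return []
--
-- def SUCC_FN(S):
--     legal_successors = []
--     for operation in ["h", "b", "d", "p"]:
--         legal_successors += NEXT_STATE(S, operation)
--     return legal_successors
--
-- def MULT_DFS(STATES, PATH):
--     # iterative DFS with an explicit stack of (state, path) pairs
--     stack = [(s, PATH) for s in reversed(STATES)]
--     while stack:
--         state, path = stack.pop()
--         if FINAL_STATE(state):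
--             return path + [state]
--         if state not in path:
--             new_path = path + [state]
--             for succ in reversed(SUCC_FN(state)):
--                 stack.append((succ, new_path))
--     return []
-- ===== Notes on version B (the rewrite author's own statement) =====
-- stated objective: alternative
-- what changed: Replaced the recursive DFS (recursion per state plus a result-threading for-loop) with an iterative DFS over an explicit stack of (state, path) pairs, pushing successor batches in reverse to preserve the left-to-right exploration order.
import Mathlib
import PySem

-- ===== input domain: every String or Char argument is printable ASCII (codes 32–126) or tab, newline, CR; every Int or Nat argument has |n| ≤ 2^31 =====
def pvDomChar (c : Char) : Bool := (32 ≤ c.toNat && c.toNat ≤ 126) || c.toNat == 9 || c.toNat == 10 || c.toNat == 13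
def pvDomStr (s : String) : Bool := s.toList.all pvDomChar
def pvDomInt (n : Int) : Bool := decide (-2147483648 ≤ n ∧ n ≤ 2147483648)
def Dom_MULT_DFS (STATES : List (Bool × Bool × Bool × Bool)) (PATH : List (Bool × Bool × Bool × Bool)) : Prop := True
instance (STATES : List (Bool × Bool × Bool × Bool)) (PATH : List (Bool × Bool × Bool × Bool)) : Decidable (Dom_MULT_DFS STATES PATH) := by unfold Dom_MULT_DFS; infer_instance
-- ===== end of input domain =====

-- ===== PORT A =====
-- One honest line: B replaces A's recursive DFS with an iterative DFS over an explicit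
-- stack of (state, path) pairs; same return value (alternative decomposition, no speed claim).

def FINAL_STATE (S : Bool × Bool × Bool × Bool) : Bool :=
  S.1 && S.2.1 && S.2.2.1 && S.2.2.2

def NEXT_STATE (S : Bool × Bool × Bool × Bool) (A : String) : List (Bool × Bool × Bool × Bool) :=
  let homer := S.1; let baby := S.2.1; let dog := S.2.2.1; let poison := S.2.2.2
  let homer_new := !homer
  if A == "h" && (baby != poison) && (baby != dog) then [(homer_new, baby, dog, poison)]
  else if A == "b" && (homer == baby) then [(homer_new, !baby, dog, poison)]
  else if A == "d" && (homer == dog) && (baby != poison) then [(homer_new, baby, !dog, poison)]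
  else if A == "p" && (homer == poison) && (baby != dog) then [(homer_new, baby, dog, !poison)]
  else []

def SUCC_FN (S : Bool × Bool × Bool × Bool) : List (Bool × Bool × Bool × Bool) :=
  ["h", "b", "d", "p"].foldl (fun acc op => acc ++ NEXT_STATE S op) []

def ON_PATH (S : Bool × Bool × Bool × Bool) (STATES : List (Bool × Bool × Bool × Bool)) : Bool :=
  if STATES.length = 0 then false
  else if S ∈ STATES then true
  else false

-- number of the 16 states not yet on the path: the measure both DFS ports terminate by
def pvFresh (PATH : List (Bool × Bool × Bool × Bool)) : Nat :=
  Fintype.card (Bool × Bool × Bool × Bool) - PATH.toFinset.card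

theorem pvFresh_lt {s : Bool × Bool × Bool × Bool} {PATH : List (Bool × Bool × Bool × Bool)}
    (h : s ∉ PATH) : pvFresh (PATH ++ [s]) < pvFresh PATH := by
  have hns : s ∉ PATH.toFinset := by simpa using h
  have hcard : (PATH ++ [s]).toFinset.card = PATH.toFinset.card + 1 := by
    simp [List.toFinset_append, Finset.card_insert_of_notMem hns]
  have hle : (PATH ++ [s]).toFinset.card ≤ Fintype.card (Bool × Bool × Bool × Bool) :=
    Finset.card_le_univ _
  unfold pvFresh; omega

theorem pvOnPath_eq (S : Bool × Bool × Bool × Bool) (L : List (Bool × Bool × Bool × Bool)) :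
    ON_PATH S L = decide (S ∈ L) := by
  cases L <;> simp [ON_PATH]

-- port of A's recursive MULT_DFS (the top 'len(STATES)==0' check is the [] case of the loop)
def MULT_DFS (STATES : List (Bool × Bool × Bool × Bool)) (PATH : List (Bool × Bool × Bool × Bool)) : List (Bool × Bool × Bool × Bool) :=
  match STATES with
  | [] => []
  | successor :: rest =>
    if FINAL_STATE successor then PATH ++ [successor]
    else if ON_PATH successor PATH then MULT_DFS rest PATH
    else
      let temp_path := MULT_DFS (SUCC_FN successor) (PATH ++ [successor])
      if temp_path = [] then MULT_DFS rest PATH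
      else if FINAL_STATE temp_path.getLast! then temp_path
      else MULT_DFS rest PATH
termination_by (pvFresh PATH, STATES.length)
decreasing_by
  · exact Prod.Lex.right _ (Nat.lt_succ_self _)
  · exact Prod.Lex.left _ _ (pvFresh_lt (by
      rename_i hop; rw [pvOnPath_eq] at hop; simpa using hop))
  · exact Prod.Lex.right _ (Nat.lt_succ_self _)
  · exact Prod.Lex.right _ (Nat.lt_succ_self _)

-- ===== PORT B =====
theorem pvSucc_len_le (s : Bool × Bool × Bool × Bool) : (SUCC_FN s).length ≤ 4 := by
  revert s; decide

def pvWeight (stack : List ((Bool × Bool × Bool × Bool) × List (Bool × Bool × Bool × Bool))) : Nat :=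
  (stack.map (fun e => 5 ^ pvFresh e.2)).sum

theorem pvWeight_push {s : Bool × Bool × Bool × Bool} {path : List (Bool × Bool × Bool × Bool)}
    (h : s ∉ path) (rest : List ((Bool × Bool × Bool × Bool) × List (Bool × Bool × Bool × Bool))) :
    pvWeight ((SUCC_FN s).map (fun t => (t, path ++ [s])) ++ rest) < pvWeight ((s, path) :: rest) := by
  have hlt := pvFresh_lt h
  have hlen := pvSucc_len_le s
  have hsum : pvWeight ((SUCC_FN s).map (fun t => (t, path ++ [s]))) =
      (SUCC_FN s).length * 5 ^ pvFresh (path ++ [s]) := by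
    unfold pvWeight
    rw [List.map_map,
      show ((fun e : (Bool × Bool × Bool × Bool) × List (Bool × Bool × Bool × Bool) =>
          5 ^ pvFresh e.2) ∘ fun t => (t, path ++ [s])) =
        fun _ => 5 ^ pvFresh (path ++ [s]) from rfl,
      List.map_const', List.sum_replicate, smul_eq_mul]
  have h1 : (SUCC_FN s).length * 5 ^ pvFresh (path ++ [s]) < 5 ^ pvFresh path := by
    calc (SUCC_FN s).length * 5 ^ pvFresh (path ++ [s])
        ≤ 4 * 5 ^ pvFresh (path ++ [s]) := Nat.mul_le_mul_right _ hlen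
      _ < 5 * 5 ^ pvFresh (path ++ [s]) := by
          have : (0:Nat) < 5 ^ pvFresh (path ++ [s]) := Nat.pow_pos (by norm_num)
          omega
      _ = 5 ^ (pvFresh (path ++ [s]) + 1) := by ring
      _ ≤ 5 ^ pvFresh path := Nat.pow_le_pow_right (by norm_num) (by omega)
  have hsplit : pvWeight ((SUCC_FN s).map (fun t => (t, path ++ [s])) ++ rest) =
      pvWeight ((SUCC_FN s).map (fun t => (t, path ++ [s]))) + pvWeight rest := by
    simp [pvWeight]
  have hcons : pvWeight ((s, path) :: rest) = 5 ^ pvFresh path + pvWeight rest := by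
    simp [pvWeight]
  rw [hsplit, hsum, hcons]
  exact Nat.add_lt_add_right h1 _

def pvDFSB (stack : List ((Bool × Bool × Bool × Bool) × List (Bool × Bool × Bool × Bool))) : List (Bool × Bool × Bool × Bool) :=
  match stack with
  | [] => []
  | (state, path) :: rest =>
    if FINAL_STATE state then path ++ [state]
    else if state ∈ path then pvDFSB rest
    else pvDFSB ((SUCC_FN state).map (fun t => (t, path ++ [state])) ++ rest)
termination_by pvWeight stack
decreasing_by
  · simp [pvWeight]
  · exact pvWeight_push (by assumption) rest

def MULT_DFS_alt (STATES : List (Bool × Bool × Bool × Bool)) (PATH : List (Bool × Bool × Bool × Bool)) : List (Bool × Bool × Bool × Bool) :=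
  pvDFSB (STATES.map (fun s => (s, PATH)))

-- ===== PRECONDITION & SPEC =====
def Spec_MULT_DFS (STATES : List (Bool × Bool × Bool × Bool)) (PATH : List (Bool × Bool × Bool × Bool)) (out : List (Bool × Bool × Bool × Bool)) : Prop := out = MULT_DFS_alt STATES PATH
instance (STATES : List (Bool × Bool × Bool × Bool)) (PATH : List (Bool × Bool × Bool × Bool)) (out : List (Bool × Bool × Bool × Bool)) : Decidable (Spec_MULT_DFS STATES PATH out) := by unfold Spec_MULT_DFS; infer_instance

-- ===== CLAIM (what is proved, stated in full; the proofs are below) =====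
def Claim_equal_MULT_DFS : Prop := ∀ (STATES : List (Bool × Bool × Bool × Bool)) (PATH : List (Bool × Bool × Bool × Bool)), Dom_MULT_DFS STATES PATH → Spec_MULT_DFS STATES PATH (MULT_DFS STATES PATH)

-- ===== LEMMAS AND PROOFS =====

-- any nonempty result of A's DFS ends in a goal state; the stack-DFS invariant follows
theorem pvGetLast!_concat {α : Type} [Inhabited α] (l : List α) (a : α) :
    (l ++ [a]).getLast! = a := by
  induction l with
  | nil => rfl
  | cons x xs ih => cases xs <;> simp_all [List.getLast!]

theorem pvLast_final (S P : List (Bool × Bool × Bool × Bool)) :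
    MULT_DFS S P = [] ∨ FINAL_STATE (MULT_DFS S P).getLast! = true := by
  fun_induction MULT_DFS S P with
  | case1 => left; rfl
  | case2 s rest P hf => right; rw [pvGetLast!_concat]; exact hf
  | case3 => simp_all
  | case4 => simp_all
  | case5 => right; simp_all
  | case6 => simp_all

theorem pvMain (S P : List (Bool × Bool × Bool × Bool)) :
    ∀ rest, pvDFSB (S.map (fun s => (s, P)) ++ rest) =
      (if MULT_DFS S P = [] then pvDFSB rest else MULT_DFS S P) := by
  fun_induction MULT_DFS S P
  case case1 => intro rest; simp
  case case2 P s rest' hf =>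
      intro rest
      simp [pvDFSB, hf]
  case case3 P s rest' hf hop ih =>
      intro rest
      have hmem : s ∈ P := by rw [pvOnPath_eq] at hop; simpa using hop
      simp only [List.map_cons, List.cons_append, pvDFSB, if_neg hf, if_pos hmem]
      exact ih rest
  case case4 P s rest' hf hop temp htemp ih1 ih2 =>
      intro rest
      have hmem : s ∉ P := by rw [pvOnPath_eq] at hop; simpa using hop
      simp only [List.map_cons, List.cons_append, pvDFSB, if_neg hf, if_neg hmem]
      have htemp' : MULT_DFS (SUCC_FN s) (P ++ [s]) = [] := htemp
      rw [ih1 (rest'.map (fun t => (t, P)) ++ rest), if_pos htemp']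
      exact ih2 rest
  case case5 P s rest' hf hop temp htemp hlast ih1 =>
      intro rest
      have hmem : s ∉ P := by rw [pvOnPath_eq] at hop; simpa using hop
      simp only [List.map_cons, List.cons_append, pvDFSB, if_neg hf, if_neg hmem]
      have htemp' : ¬ MULT_DFS (SUCC_FN s) (P ++ [s]) = [] := htemp
      rw [ih1 (rest'.map (fun t => (t, P)) ++ rest), if_neg htemp']
      simp only [if_neg htemp]
      rfl
  case case6 P s rest' hf hop temp htemp hlast ih1 ih2 =>
      intro rest
      rcases pvLast_final (SUCC_FN s) (P ++ [s]) with h | h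
      · exact absurd h htemp
      · exact absurd h hlast

-- ===== VERDICT (by name: the statement is the Claim_ definition above) =====
theorem MULT_DFS_spec : Claim_equal_MULT_DFS := by
  intro S P _
  unfold Spec_MULT_DFS MULT_DFS_alt
  have h := pvMain S P []
  rw [List.append_nil] at h
  rw [h]
  split <;> simp_all [pvDFSB]
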